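-- pv_equiv track=rewrite | github.com/rsarwas/aoc | 2018-12/answers.py | parse
-- ===== SOURCE A (Python) =====
-- def parse(lines):
--     alive = ""
--     rules = []
--     for line in lines:
--         if line.strip() == "":
--             continue
--         if line.startswith("initial state: "):
--             alive = line.strip().replace("initial state: ","")
--             continue
--         if line.count(" => ") == 1:
--             rule,end = line.strip().split(" => ")
--             if end == "#":
--                 rules.append(rule_from_string(rule))
--     return alive, rules
--
-- def rule_from_string(str):
--     shift = 0
--     rule = 0
--     for char in str:
--         state = 1 if char == "#" else 0
--         rule += state<<shift
--         shift += 1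
--     return rule
-- ===== SOURCE B (Python) =====
-- INIT = "initial state: "
--
-- def parse(lines):
--     # Pass 1: the last "initial state: " line (if any) provides the state.
--     alive = ""
--     for line in lines:
--         if line.startswith(INIT):
--             alive = line.strip().replace(INIT, "")
--     # Pass 2: collect rules from the non-blank, non-header rule lines.
--     rules = []
--     for line in lines:
--         s = line.strip()
--         if s and not line.startswith(INIT) and line.count(" => ") == 1:
--             rule, end = s.split(" => ")
--             if end == "#":
--                 rules.append(rule_value(rule))
--     return alive, rules
--
-- def rule_value(pattern):
--     # Horner evaluation back-to-front: bit 0 is the first character.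
--     value = 0
--     for char in reversed(pattern):
--         value = 2 * value + (1 if char == "#" else 0)
--     return value
-- ===== Notes on version B (the rewrite author's own statement) =====
-- stated objective: alternative
-- what changed: Replaces A's single mixed-accumulator loop with two independent passes (one taking the last 'initial state: ' line, one collecting rules) and replaces the shift-and-accumulate bit packing with a back-to-front Horner evaluation of the reversed pattern.
import Mathlib
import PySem

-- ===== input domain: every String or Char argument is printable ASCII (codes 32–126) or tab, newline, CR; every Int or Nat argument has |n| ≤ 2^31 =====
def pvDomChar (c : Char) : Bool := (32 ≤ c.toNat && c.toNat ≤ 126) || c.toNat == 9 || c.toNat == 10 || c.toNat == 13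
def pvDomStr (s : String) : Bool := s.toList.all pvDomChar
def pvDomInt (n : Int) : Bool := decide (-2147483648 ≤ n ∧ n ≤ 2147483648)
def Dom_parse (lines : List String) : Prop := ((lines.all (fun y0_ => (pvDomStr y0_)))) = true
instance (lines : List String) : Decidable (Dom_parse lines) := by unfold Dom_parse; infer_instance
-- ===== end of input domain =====

-- B replaces A's single mixed-accumulator loop with two independent passes and a
-- back-to-front Horner bit packing; same return value (objective: alternative).

-- ===== PORT A =====
def ruleFromString (s : String) : Int :=
  (s.toList.foldl
    (fun (st : Int × Nat) c =>
      let state : Int := if c == '#' then 1 else 0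
      (st.1 + state <<< st.2, st.2 + 1))
    (0, 0)).1

def parse (lines : List String) : String × List Int :=
  lines.foldl
    (fun (acc : String × List Int) line =>
      if PySem.Str.strip line == "" then acc
      else if PySem.Str.startswith line "initial state: " then
        (PySem.Str.replace (PySem.Str.strip line) "initial state: " "", acc.2)
      else if PySem.Str.count line " => " == 1 then
        match PySem.Str.split? (PySem.Str.strip line) " => " with
        | some [rule, e] => if e == "#" then (acc.1, acc.2 ++ [ruleFromString rule]) else acc
        | _ => acc  -- Python raises ValueError here; excluded by Pre_parse
      else acc)
    ("", [])

-- ===== PORT B =====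
def ruleValue (pattern : String) : Int :=
  pattern.toList.reverse.foldl (fun v c => 2 * v + (if c == '#' then (1 : Int) else 0)) 0

def parse_alt (lines : List String) : String × List Int :=
  let alive := lines.foldl
    (fun a line =>
      if PySem.Str.startswith line "initial state: " then
        PySem.Str.replace (PySem.Str.strip line) "initial state: " ""
      else a) ""
  let rules := lines.foldl
    (fun (r : List Int) line =>
      let s := PySem.Str.strip line
      if s != "" && !(PySem.Str.startswith line "initial state: ")
          && (PySem.Str.count line " => " == 1) then
        match PySem.Str.split? s " => " with
        | none => r
        | some parts =>
          match parts with
          | [] => r  -- Python raises ValueError here; excluded by Pre_parse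
          | rule :: rest =>
            match rest with
            | [] => r  -- Python raises ValueError here; excluded by Pre_parse
            | e :: rest2 =>
              match rest2 with
              | [] => if e == "#" then r ++ [ruleValue rule] else r
              | _ :: _ => r  -- unreachable: split on " => " occurring once
      else r) []
  (alive, rules)

-- ===== PRECONDITION & SPEC =====
-- Pre_ excludes exactly the inputs where A raises ValueError (tuple unpacking of a
-- 1-element split): a non-blank, non-header line containing " => " once whose
-- stripped form no longer contains it; B's split raises there as well.
def Pre_parse (lines : List String) : Prop :=
  ∀ l ∈ lines, PySem.Str.count l " => " = 1 → PySem.Str.strip l ≠ "" →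
    PySem.Str.startswith l "initial state: " = false →
    PySem.Str.count (PySem.Str.strip l) " => " = 1
instance (lines : List String) : Decidable (Pre_parse lines) := by
  unfold Pre_parse; infer_instance

def pvWitness_parse : List String :=
  ["initial state: #..#", "", "..#.. => #", "#.#.# => .", " ##.## => # "]

def Spec_parse (lines : List String) (out : String × List Int) : Prop := out = parse_alt lines
instance (lines : List String) (out : String × List Int) : Decidable (Spec_parse lines out) := by
  unfold Spec_parse; infer_instance

-- ===== CLAIM (what is proved, stated in full; the proofs are below) =====
def Claim_equal_parse : Prop :=
  ∀ (lines : List String), Dom_parse lines → Pre_parse lines → Spec_parse lines (parse lines)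

-- ===== LEMMAS AND PROOFS =====

-- A header line starts with the non-space character 'i', so it does not strip to "".
lemma strip_ne_of_startswith {l : String}
    (h : PySem.Str.startswith l "initial state: " = true) :
    (PySem.Str.strip l == "") = false := by
  simp only [PySem.Str.startswith_eq] at h
  rw [PySem.Chars.startswith_iff] at h
  obtain ⟨t, ht⟩ := h
  have hne : PySem.Chars.strip l.toList ≠ [] := by
    rw [← ht]
    simp only [PySem.Chars.strip, PySem.Chars.lstrip, PySem.Chars.rstrip]
    intro hcontra
    have : ∀ c ∈ (List.dropWhile PySem.Chars.isspace
        ("initial state: ".toList ++ t)).reverse, PySem.Chars.isspace c = true := by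
      rw [← List.dropWhile_eq_nil_iff]
      simpa using hcontra
    have hi : 'i' ∈ (List.dropWhile PySem.Chars.isspace
        ("initial state: ".toList ++ t)).reverse := by
      simp [PySem.Chars.isspace]
    have := this 'i' hi
    simp [PySem.Chars.isspace] at this
  cases hbe : (PySem.Str.strip l == "") with
  | false => rfl
  | true =>
    exfalso
    apply hne
    have : PySem.Str.strip l = "" := by simpa using hbe
    have := congrArg String.toList this
    simpa [PySem.Str.toList_strip] using this

-- the bit value of a pattern, back-to-front (bit 0 = first char)
def bitVal (cs : List Char) : Int :=
  cs.foldr (fun c acc => 2 * acc + (if c == '#' then (1 : Int) else 0)) 0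

lemma ruleFromString_inv (cs : List Char) (v : Int) (k : Nat) :
    (cs.foldl
      (fun (st : Int × Nat) c =>
        let state : Int := if c == '#' then 1 else 0
        (st.1 + state <<< st.2, st.2 + 1))
      (v, k)).1 = v + 2 ^ k * bitVal cs := by
  induction cs generalizing v k with
  | nil => simp [bitVal]
  | cons c cs ih =>
    simp only [List.foldl_cons, bitVal, List.foldr_cons]
    rw [ih]
    have hsh : ∀ a : Int, a <<< k = a * 2 ^ k := fun a => by
      simpa using Int.shiftLeft_eq a k
    rw [hsh]
    show v + (if c == '#' then (1:Int) else 0) * 2 ^ k + 2 ^ (k + 1) *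
        (cs.foldr (fun c acc => 2 * acc + (if c == '#' then (1 : Int) else 0)) 0)
      = v + 2 ^ k * (2 * (cs.foldr (fun c acc => 2 * acc + (if c == '#' then (1 : Int) else 0)) 0)
          + (if c == '#' then (1:Int) else 0))
    ring

lemma ruleFromString_eq_ruleValue (s : String) : ruleFromString s = ruleValue s := by
  unfold ruleFromString ruleValue
  rw [List.foldl_reverse]
  have := ruleFromString_inv s.toList 0 0
  simp only [pow_zero, one_mul, zero_add] at this
  rw [this]
  rfl

-- one line advances both components exactly as B's two passes do
lemma step_eq (a : String) (r : List Int) (line : String) :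
    (fun (acc : String × List Int) line =>
      if PySem.Str.strip line == "" then acc
      else if PySem.Str.startswith line "initial state: " then
        (PySem.Str.replace (PySem.Str.strip line) "initial state: " "", acc.2)
      else if PySem.Str.count line " => " == 1 then
        match PySem.Str.split? (PySem.Str.strip line) " => " with
        | some [rule, e] => if e == "#" then (acc.1, acc.2 ++ [ruleFromString rule]) else acc
        | _ => acc
      else acc) (a, r) line
    = ((fun a line =>
          if PySem.Str.startswith line "initial state: " then
            PySem.Str.replace (PySem.Str.strip line) "initial state: " ""
          else a) a line,
       (fun (r : List Int) line =>
          let s := PySem.Str.strip line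
          if s != "" && !(PySem.Str.startswith line "initial state: ")
              && (PySem.Str.count line " => " == 1) then
            match PySem.Str.split? s " => " with
            | none => r
            | some parts =>
              match parts with
              | [] => r
              | rule :: rest =>
                match rest with
                | [] => r
                | e :: rest2 =>
                  match rest2 with
                  | [] => if e == "#" then r ++ [ruleValue rule] else r
                  | _ :: _ => r
          else r) r line) := by
  simp only []
  by_cases hp : PySem.Str.startswith line "initial state: " = true
  · rw [strip_ne_of_startswith hp, hp]
    simp
  · have hp' : PySem.Str.startswith line "initial state: " = false := by
      cases h : PySem.Str.startswith line "initial state: " <;> simp_all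
    rw [hp']
    by_cases he : (PySem.Str.strip line == "") = true
    · have hstr : PySem.Str.strip line = "" := by simpa using he
      rw [he]
      simp [hstr]
    · have he' : (PySem.Str.strip line == "") = false := by
        cases h : (PySem.Str.strip line == "") <;> simp_all
      rw [he']
      simp only [Bool.not_false, if_false, Bool.false_eq_true]
      by_cases hc : (PySem.Str.count line " => " == 1) = true
      · rw [hc]
        simp only [bne, he', Bool.not_false, Bool.and_true, if_true]
        cases hs : PySem.Str.split? (PySem.Str.strip line) " => " with
        | none => simp
        | some parts =>
          match parts with
          | [] => simp
          | [x] => simp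
          | [x, y] =>
            by_cases hy : (y == "#") = true
            · simp [hy, ruleFromString_eq_ruleValue]
            · have hy' : (y == "#") = false := by
                cases h : (y == "#") <;> simp_all
              simp [hy']
          | x :: y :: z :: zs => simp
      · have hc' : (PySem.Str.count line " => " == 1) = false := by
          cases h : (PySem.Str.count line " => " == 1) <;> simp_all
        rw [hc']
        simp

lemma parse_loop (L : List String) (a : String) (r : List Int) :
    L.foldl
      (fun (acc : String × List Int) line =>
        if PySem.Str.strip line == "" then acc
        else if PySem.Str.startswith line "initial state: " then
          (PySem.Str.replace (PySem.Str.strip line) "initial state: " "", acc.2)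
        else if PySem.Str.count line " => " == 1 then
          match PySem.Str.split? (PySem.Str.strip line) " => " with
          | some [rule, e] => if e == "#" then (acc.1, acc.2 ++ [ruleFromString rule]) else acc
          | _ => acc
        else acc) (a, r)
    = (L.foldl
        (fun a line =>
          if PySem.Str.startswith line "initial state: " then
            PySem.Str.replace (PySem.Str.strip line) "initial state: " ""
          else a) a,
       L.foldl
        (fun (r : List Int) line =>
          let s := PySem.Str.strip line
          if s != "" && !(PySem.Str.startswith line "initial state: ")
              && (PySem.Str.count line " => " == 1) then
            match PySem.Str.split? s " => " with
            | none => r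
            | some parts =>
              match parts with
              | [] => r
              | rule :: rest =>
                match rest with
                | [] => r
                | e :: rest2 =>
                  match rest2 with
                  | [] => if e == "#" then r ++ [ruleValue rule] else r
                  | _ :: _ => r
          else r) r) := by
  induction L generalizing a r with
  | nil => rfl
  | cons l L ih =>
    have h := step_eq a r l
    simp only [List.foldl_cons, h]
    exact ih _ _

-- ===== VERDICT (by name: the statement is the Claim_ definition above) =====
theorem parse_spec : Claim_equal_parse := by
  intro lines _ _
  unfold Spec_parse parse parse_alt
  exact parse_loop lines "" []
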